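-- pv_equiv track=rewrite | github.com/DandyBoo/algorithms-templates | python/sprint1_nonfinals/sp1_final_2.py | typing
-- ===== SOURCE A (Python) =====
-- def typing(k, matrix):
--     deleted = set()
--     score = {}
--     max_keys = k * 2
--     for i in matrix:
--         if i != '.' and i not in deleted:
--             score[i] = score.get(i, 0) + 1
--             if score[i] > max_keys:
--                 deleted.add(i)
--                 del score[i]
--     return len(score)
-- ===== SOURCE B (Python) =====
-- def typing(k, matrix):
--     return sum(
--         1
--         for key in set(matrix)
--         if key != '.' and matrix.count(key) <= k * 2
--     )
-- ===== Notes on version B (the rewrite author's own statement) =====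
-- stated objective: simpler
-- what changed: Dropped A's single-pass counting dict and 'deleted' set entirely: B takes the distinct keys via set(matrix) and, for each, counts its occurrences by a direct matrix.count scan, keeping those with at most k*2 presses.
import Mathlib
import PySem

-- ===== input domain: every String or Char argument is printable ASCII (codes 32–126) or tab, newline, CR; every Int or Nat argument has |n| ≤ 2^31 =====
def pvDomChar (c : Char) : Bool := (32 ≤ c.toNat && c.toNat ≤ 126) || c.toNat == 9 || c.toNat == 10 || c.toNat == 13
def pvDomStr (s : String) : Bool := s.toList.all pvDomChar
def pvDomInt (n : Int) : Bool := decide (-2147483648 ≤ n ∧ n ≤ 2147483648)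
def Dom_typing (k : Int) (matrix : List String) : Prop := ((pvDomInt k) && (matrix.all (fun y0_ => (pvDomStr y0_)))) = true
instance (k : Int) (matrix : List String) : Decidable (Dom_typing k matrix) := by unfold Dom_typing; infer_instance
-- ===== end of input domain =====

-- B drops A's counting dict and 'deleted' set entirely: it takes the distinct keys
-- (set(matrix)) and counts each one's occurrences by a direct matrix.count scan;
-- objective: simpler (not faster).

-- ===== PORT A =====
-- the body of A's for-loop (deleted set, score dict, mid-stream deletion)
def typingStep (maxKeys : Int) (st : PySem.Set String × PySem.Dict String Int) (i : String) :
    PySem.Set String × PySem.Dict String Int :=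
  if i ≠ "." ∧ PySem.Set.contains st.1 i = false then
    let score := st.2.insert i (st.2.getD i 0 + 1)
    if score.getD i 0 > maxKeys then (PySem.Set.add st.1 i, score.erase i)
    else (st.1, score)
  else st

def typing (k : Int) (matrix : List String) : Int :=
  ((matrix.foldl (typingStep (k * 2)) (PySem.Set.empty, PySem.Dict.empty)).2.size : Int)

-- ===== PORT B =====
def typing_alt (k : Int) (matrix : List String) : Int :=
  (((PySem.Set.ofList matrix).filter
      (fun key => decide (key ≠ ".") && decide ((matrix.count key : Int) ≤ k * 2))).length : Int)

-- ===== PRECONDITION & SPEC =====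
def Spec_typing (k : Int) (matrix : List String) (out : Int) : Prop := out = typing_alt k matrix
instance (k : Int) (matrix : List String) (out : Int) : Decidable (Spec_typing k matrix out) := by unfold Spec_typing; infer_instance

-- ===== CLAIM (what is proved, stated in full; the proofs are below) =====
def Claim_equal_typing : Prop := ∀ (k : Int) (matrix : List String), Dom_typing k matrix → Spec_typing k matrix (typing k matrix)

-- ===== LEMMAS AND PROOFS =====

-- the keys that survive A's pass over l: non-'.' entries (first-occurrence order) whose total count is ≤ k*2
def aliveKeys (k : Int) (l : List String) : List String :=
  (PySem.Set.ofList (l.filter (fun s => decide (s ≠ ".")))).filter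
    (fun s => decide ((l.count s : Int) ≤ k * 2))

def scoreItems (k : Int) (l : List String) : List (String × Int) :=
  (aliveKeys k l).map (fun s => (s, (l.count s : Int)))

theorem find?_beq {α : Type} [BEq α] [LawfulBEq α] (l : List α) (x : α) :
    l.find? (fun s => s == x) = if x ∈ l then some x else none := by
  induction l with
  | nil => simp
  | cons a t ih =>
    by_cases h : a = x
    · subst h; simp
    · simp [h, ih, beq_iff_eq, List.mem_cons, Ne.symm h]

theorem count_concat_ne (l : List String) (x s : String) (h : s ≠ x) :
    (l ++ [x]).count s = l.count s := by
  simp [List.count_append, Ne.symm h]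

theorem count_concat_self' (l : List String) (x : String) :
    (l ++ [x]).count x = l.count x + 1 := by
  simp [List.count_append]

theorem mem_aliveKeys (k : Int) (l : List String) (s : String) :
    s ∈ aliveKeys k l ↔ (s ∈ l ∧ s ≠ "." ∧ (l.count s : Int) ≤ k * 2) := by
  simp [aliveKeys, List.mem_filter, PySem.Set.mem_ofList, and_assoc]

theorem mem_setOf (l : List String) (s : String) :
    s ∈ PySem.Set.ofList (l.filter (fun t => decide (t ≠ "."))) ↔ (s ∈ l ∧ s ≠ ".") := by
  simp [PySem.Set.mem_ofList, List.mem_filter]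

-- replacing the x-pairs and then dropping all x-pairs = just dropping all x-pairs
theorem filter_ne_map_replace (items : List (String × Int)) (x : String) (q : String × Int)
    (hq : q.1 = x) :
    (items.map (fun p => if p.1 == x then q else p)).filter (fun p => !(p.1 == x))
      = items.filter (fun p => !(p.1 == x)) := by
  induction items with
  | nil => simp
  | cons a t ih =>
    by_cases h : a.1 = x
    · have e1 : (if (a.1 == x) = true then q else a) = q := by simp [h]
      simp only [List.map_cons, e1, List.filter_cons]
      rw [show (!(q.1 == x)) = false from by simp [hq],
          show (!(a.1 == x)) = false from by simp [h]]
      simpa using ih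
    · have e1 : (if (a.1 == x) = true then q else a) = a := by simp [h]
      simp only [List.map_cons, e1, List.filter_cons]
      by_cases hb : (!(a.1 == x)) = true
      · rw [if_pos hb, if_pos hb, ih]
      · rw [if_neg hb, if_neg hb, ih]

theorem aliveKeys_concat_big (k : Int) (l : List String) (x : String) (hx : x ≠ ".")
    (hbig : (l.count x : Int) + 1 > k * 2) :
    aliveKeys k (l ++ [x]) = (aliveKeys k l).filter (fun s => !(s == x)) := by
  unfold aliveKeys
  rw [List.filter_filter]
  have hSconcat : PySem.Set.ofList ((l ++ [x]).filter (fun s => decide (s ≠ ".")))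
      = PySem.Set.add (PySem.Set.ofList (l.filter (fun s => decide (s ≠ ".")))) x := by
    rw [List.filter_append]
    simp [hx, PySem.Set.ofList_eq_foldl]
  rw [hSconcat]
  by_cases hxl : x ∈ l
  · have hxS : x ∈ PySem.Set.ofList (l.filter (fun s => decide (s ≠ "."))) :=
      (mem_setOf l x).mpr ⟨hxl, hx⟩
    rw [PySem.Set.add, if_pos (by simpa [PySem.Set.contains, List.contains_iff_mem] using hxS)]
    apply List.filter_congr
    intro s _
    by_cases h : s = x
    · subst h
      rw [count_concat_self']
      have h1 : ¬ (((l.count s + 1 : Nat) : Int) ≤ k * 2) := by push_cast; omega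
      simp 
      omega
    · rw [count_concat_ne l x s h]
      simp [h]
  · have hxS : x ∉ PySem.Set.ofList (l.filter (fun s => decide (s ≠ "."))) := by
      intro h; exact hxl ((mem_setOf l x).mp h).1
    rw [PySem.Set.add, if_neg (by simpa [PySem.Set.contains, List.contains_iff_mem] using hxS)]
    rw [List.filter_append]
    have hxpart : [x].filter (fun s => decide (((l ++ [x]).count s : Int) ≤ k * 2)) = [] := by
      have : ¬ (((l ++ [x]).count x : Int) ≤ k * 2) := by
        rw [count_concat_self']; push_cast; omega
      simp 
      omega
    rw [hxpart, List.append_nil]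
    apply List.filter_congr
    intro s hs
    have hsx : s ≠ x := fun he => hxS (he ▸ hs)
    rw [count_concat_ne l x s hsx]
    simp [hsx]

theorem aliveKeys_concat_small (k : Int) (l : List String) (x : String) (hx : x ≠ ".")
    (hsm : (l.count x : Int) + 1 ≤ k * 2) :
    aliveKeys k (l ++ [x]) = if x ∈ l then aliveKeys k l else aliveKeys k l ++ [x] := by
  unfold aliveKeys
  have hSconcat : PySem.Set.ofList ((l ++ [x]).filter (fun s => decide (s ≠ ".")))
      = PySem.Set.add (PySem.Set.ofList (l.filter (fun s => decide (s ≠ ".")))) x := by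
    rw [List.filter_append]
    simp [hx, PySem.Set.ofList_eq_foldl]
  rw [hSconcat]
  by_cases hxl : x ∈ l
  · have hxS : x ∈ PySem.Set.ofList (l.filter (fun s => decide (s ≠ "."))) :=
      (mem_setOf l x).mpr ⟨hxl, hx⟩
    rw [PySem.Set.add, if_pos (by simpa [PySem.Set.contains, List.contains_iff_mem] using hxS),
        if_pos hxl]
    apply List.filter_congr
    intro s _
    by_cases h : s = x
    · subst h
      rw [count_concat_self']
      have h1 : ((l.count s + 1 : Nat) : Int) ≤ k * 2 := by push_cast; omega
      have h2 : (l.count s : Int) ≤ k * 2 := by omega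
      simp [h2]
      omega
    · rw [count_concat_ne l x s h]
  · have hxS : x ∉ PySem.Set.ofList (l.filter (fun s => decide (s ≠ "."))) := by
      intro h; exact hxl ((mem_setOf l x).mp h).1
    rw [PySem.Set.add, if_neg (by simpa [PySem.Set.contains, List.contains_iff_mem] using hxS),
        if_neg hxl]
    rw [List.filter_append]
    have hxpart : [x].filter (fun s => decide (((l ++ [x]).count s : Int) ≤ k * 2)) = [x] := by
      have : ((l ++ [x]).count x : Int) ≤ k * 2 := by
        rw [count_concat_self']; push_cast; omega
      simp 
      omega
    rw [hxpart]
    congr 1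
    apply List.filter_congr
    intro s hs
    have hsx : s ≠ x := fun he => hxS (he ▸ hs)
    rw [count_concat_ne l x s hsx]

-- A's loop invariant: the deleted set holds exactly the keys seen whose count exceeded k*2,
-- and the score dict's items are exactly the alive keys paired with their counts.
theorem typing_inv (k : Int) (l : List String) :
    (∀ s, PySem.Set.contains (l.foldl (typingStep (k * 2)) (PySem.Set.empty, PySem.Dict.empty)).1 s
        = (decide (s ≠ ".") && decide (1 ≤ l.count s) && decide ((l.count s : Int) > k * 2)))
    ∧ (l.foldl (typingStep (k * 2)) (PySem.Set.empty, PySem.Dict.empty)).2.items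
        = scoreItems k l := by
  induction l using List.reverseRecOn with
  | nil =>
    constructor
    · intro s; simp [PySem.Set.contains, PySem.Set.empty]
    · simp [PySem.Dict.empty, scoreItems, aliveKeys, PySem.Set.ofList]
  | append_singleton l x ih =>
    obtain ⟨ihD, ihS⟩ := ih
    rw [List.foldl_concat]
    set st := l.foldl (typingStep (k * 2)) (PySem.Set.empty, PySem.Dict.empty) with hst
    -- score lookups, derived from the items characterisation
    have hget : ∀ y, st.2.get? y = if y ∈ aliveKeys k l then some ((l.count y : Int)) else none := by
      intro y
      rw [show st.2.get? y = ((st.2.items.find? (fun p => p.1 == y)).map (·.2)) from rfl, ihS]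
      rw [scoreItems, List.find?_map]
      rw [show ((fun (p : String × Int) => p.1 == y) ∘ (fun s => (s, (l.count s : Int))))
            = (fun s => s == y) from rfl]
      rw [find?_beq]
      split <;> simp
    have hcont : ∀ y, st.2.contains y = decide (y ∈ aliveKeys k l) := by
      intro y
      rw [PySem.Dict.contains_eq_isSome_get?, hget y]
      split <;> simp_all
    by_cases hx : x = "."
    · -- the '.' entry is skipped and counts of other keys are unchanged
      subst hx
      have hstep : typingStep (k * 2) st "." = st := by simp [typingStep]
      rw [hstep]
      have hfilter : (l ++ ["."]).filter (fun s => decide (s ≠ "."))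
          = l.filter (fun s => decide (s ≠ ".")) := by
        simp [List.filter_append]
      constructor
      · intro s
        by_cases hs : s = "."
        · subst hs; rw [ihD "."]; simp
        · rw [ihD s, count_concat_ne l "." s hs]
      · rw [ihS]
        unfold scoreItems aliveKeys
        rw [hfilter]
        have hpred : ∀ s ∈ PySem.Set.ofList (l.filter (fun t => decide (t ≠ "."))),
            decide (((l ++ ["."]).count s : Int) ≤ k * 2) = decide ((l.count s : Int) ≤ k * 2) := by
          intro s hs
          rw [count_concat_ne l "." s ((mem_setOf l s).mp hs).2]
        rw [List.filter_congr hpred]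
        apply List.map_congr_left
        intro s hs
        rw [count_concat_ne l "." s ((mem_aliveKeys k l s).mp hs).2.1]
    · -- a real key x
      by_cases hdel : 1 ≤ l.count x ∧ (l.count x : Int) > k * 2
      · -- x was already deleted: the step does nothing
        have hc : PySem.Set.contains st.1 x = true := by
          rw [ihD x]; simp [hx, hdel.1, hdel.2]
        have hstep : typingStep (k * 2) st x = st := by
          unfold typingStep
          rw [if_neg]
          rintro ⟨-, h2⟩
          exact Bool.noConfusion (hc.symm.trans h2)
        rw [hstep]
        have hbig : (l.count x : Int) + 1 > k * 2 := by omega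
        constructor
        · intro s
          by_cases hs : s = x
          · subst hs
            rw [hc, count_concat_self']
            have h1 : 1 ≤ l.count s + 1 := by omega
            have h2 : ((l.count s + 1 : Nat) : Int) > k * 2 := by push_cast; omega
            simp [hx, h1]
            all_goals omega
          · rw [ihD s, count_concat_ne l x s hs]
        · rw [ihS]
          unfold scoreItems
          rw [aliveKeys_concat_big k l x hx hbig]
          have hnox : (aliveKeys k l).filter (fun s => !(s == x)) = aliveKeys k l := by
            apply List.filter_eq_self.mpr
            intro s hs
            have : s ≠ x := by
              intro he; subst he
              exact absurd ((mem_aliveKeys k l s).mp hs).2.2 (by omega)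
            simp [this]
          rw [hnox]
          apply List.map_congr_left
          intro s hs
          have hsx : s ≠ x := by
            intro he; subst he
            exact absurd ((mem_aliveKeys k l s).mp hs).2.2 (by omega)
          rw [count_concat_ne l x s hsx]
      · -- x not deleted yet: it is counted (and possibly deleted now)
        have hc : PySem.Set.contains st.1 x = false := by
          rw [ihD x]
          by_cases h1 : 1 ≤ l.count x
          · have h2 : ¬ ((l.count x : Int) > k * 2) := fun h => hdel ⟨h1, h⟩
            simp [h2]
          · simp [show ¬ (1 ≤ l.count x) from h1]
        have hv0 : st.2.getD x 0 = (l.count x : Int) := by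
          rw [PySem.Dict.getD_eq_get?_getD, hget x]
          by_cases hmem : x ∈ aliveKeys k l
          · simp [hmem]
          · have hcnt0 : l.count x = 0 := by
              by_contra hne
              have h1 : 1 ≤ l.count x := Nat.one_le_iff_ne_zero.mpr hne
              have hxl : x ∈ l := List.count_pos_iff.mp (by omega)
              have : ¬ ((l.count x : Int) ≤ k * 2) := by
                intro hle; exact hmem ((mem_aliveKeys k l x).mpr ⟨hxl, hx, hle⟩)
              exact hdel ⟨h1, by omega⟩
            simp [hmem, hcnt0]
        have hmem_iff : x ∈ aliveKeys k l ↔ x ∈ l := by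
          constructor
          · intro h; exact ((mem_aliveKeys k l x).mp h).1
          · intro hxl
            have h1 : 1 ≤ l.count x := List.count_pos_iff.mpr hxl
            have h2 : (l.count x : Int) ≤ k * 2 := by
              by_contra h
              exact hdel ⟨h1, by omega⟩
            exact (mem_aliveKeys k l x).mpr ⟨hxl, hx, h2⟩
        have hgetD_ins : (st.2.insert x (st.2.getD x 0 + 1)).getD x 0 = (l.count x : Int) + 1 := by
          rw [PySem.Dict.getD_insert_self, hv0]
        by_cases hbig : (l.count x : Int) + 1 > k * 2
        · -- the new count overflows: x is deleted now
          have hstep : typingStep (k * 2) st x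
              = (PySem.Set.add st.1 x, (st.2.insert x (st.2.getD x 0 + 1)).erase x) := by
            simp only [typingStep]
            rw [if_pos ⟨hx, hc⟩, if_pos (by rw [hgetD_ins]; exact hbig)]
          rw [hstep]
          have hadd : PySem.Set.add st.1 x = st.1 ++ [x] := by
            rw [PySem.Set.add, if_neg (by rw [hc]; simp)]
          constructor
          · intro s
            by_cases hs : s = x
            · subst hs
              rw [hadd]
              have hl : PySem.Set.contains (st.1 ++ [s]) s = true := by
                simp [PySem.Set.contains]
              rw [hl, count_concat_self']
              have h1 : 1 ≤ l.count s + 1 := by omega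
              have h2 : ((l.count s + 1 : Nat) : Int) > k * 2 := by push_cast; omega
              simp [hx, h1]
              all_goals omega
            · rw [hadd]
              have hl : PySem.Set.contains (st.1 ++ [x]) s = PySem.Set.contains st.1 s := by
                simp [PySem.Set.contains]
                exact fun he => absurd he hs
              rw [hl, ihD s, count_concat_ne l x s hs]
          · -- items: the x-entry (if any) disappears; everything else is untouched
            show ((st.2.insert x (st.2.getD x 0 + 1)).erase x).items = scoreItems k (l ++ [x])
            have herase : ((st.2.insert x (st.2.getD x 0 + 1)).erase x).items
                = (st.2.insert x (st.2.getD x 0 + 1)).items.filter (fun p => !(p.1 == x)) := rfl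
            have hins_filter : (st.2.insert x (st.2.getD x 0 + 1)).items.filter (fun p => !(p.1 == x))
                = st.2.items.filter (fun p => !(p.1 == x)) := by
              by_cases hmem : x ∈ aliveKeys k l
              · rw [PySem.Dict.items_insert_of_contains _ _ (by rw [hcont x]; simpa)]
                exact filter_ne_map_replace _ x _ rfl
              · rw [PySem.Dict.items_insert_of_not_contains _ _ (by rw [hcont x]; simpa)]
                rw [List.filter_append]
                simp
            rw [herase, hins_filter, ihS]
            unfold scoreItems
            rw [List.filter_map]
            rw [show ((fun (p : String × Int) => !(p.1 == x)) ∘ (fun s => (s, (l.count s : Int))))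
                  = (fun s => !(s == x)) from rfl]
            rw [aliveKeys_concat_big k l x hx hbig]
            apply List.map_congr_left
            intro s hs
            have hsx : s ≠ x := by
              have := List.of_mem_filter hs
              simpa [beq_iff_eq] using this
            rw [count_concat_ne l x s hsx]
        · -- the new count still fits: x stays with count + 1
          have hstep : typingStep (k * 2) st x = (st.1, st.2.insert x (st.2.getD x 0 + 1)) := by
            simp only [typingStep]
            rw [if_pos ⟨hx, hc⟩, if_neg (by rw [hgetD_ins]; exact hbig)]
          rw [hstep]
          have hsm : (l.count x : Int) + 1 ≤ k * 2 := by omega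
          constructor
          · intro s
            by_cases hs : s = x
            · subst hs
              rw [hc, count_concat_self']
              have h2 : ¬ (((l.count s + 1 : Nat) : Int) > k * 2) := by push_cast; omega
              simp 
              all_goals omega
            · rw [ihD s, count_concat_ne l x s hs]
          · show (st.2.insert x (st.2.getD x 0 + 1)).items = scoreItems k (l ++ [x])
            unfold scoreItems
            rw [aliveKeys_concat_small k l x hx hsm]
            by_cases hxl : x ∈ l
            · rw [if_pos hxl]
              have hmem : x ∈ aliveKeys k l := hmem_iff.mpr hxl
              rw [PySem.Dict.items_insert_of_contains _ _ (by rw [hcont x]; simpa), ihS]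
              unfold scoreItems
              rw [List.map_map]
              apply List.map_congr_left
              intro s hs
              by_cases h : s = x
              · subst h
                simp [Function.comp, hv0]
              · simp only [Function.comp]
                rw [count_concat_ne l x s h]
                simp [beq_iff_eq, h]
            · rw [if_neg hxl]
              have hmem : x ∉ aliveKeys k l := fun h => hxl (hmem_iff.mp h)
              rw [PySem.Dict.items_insert_of_not_contains _ _ (by rw [hcont x]; simpa), ihS]
              have hcnt0 : l.count x = 0 := by
                by_contra hne
                exact hxl (List.count_pos_iff.mp (Nat.pos_of_ne_zero hne))
              rw [List.map_append]
              congr 1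
              · unfold scoreItems
                apply List.map_congr_left
                intro s hs
                have hsx : s ≠ x := fun he => hxl (he ▸ ((mem_aliveKeys k l s).mp hs).1)
                rw [count_concat_ne l x s hsx]
              · rw [hv0, hcnt0]
                simp [hcnt0]

-- B's filtered distinct-key list is a permutation of aliveKeys (both nodup, same members)
theorem aliveKeys_perm_altKeys (k : Int) (matrix : List String) :
    (aliveKeys k matrix).Perm
      ((PySem.Set.ofList matrix).filter
        (fun key => decide (key ≠ ".") && decide ((matrix.count key : Int) ≤ k * 2))) := by
  apply (List.perm_ext_iff_of_nodup _ _).mpr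
  · intro s
    rw [mem_aliveKeys]
    simp [List.mem_filter, PySem.Set.mem_ofList]
  · exact (PySem.Set.nodup_ofList _).filter _
  · exact (PySem.Set.nodup_ofList _).filter _

-- ===== VERDICT (by name: the statement is the Claim_ definition above) =====
theorem typing_spec : Claim_equal_typing := by
  intro k matrix _
  unfold Spec_typing typing typing_alt
  simp only [PySem.Dict.size, (typing_inv k matrix).2]
  rw [show (scoreItems k matrix).length = (aliveKeys k matrix).length from by
        simp [scoreItems]]
  rw [(aliveKeys_perm_altKeys k matrix).length_eq]
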